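-- pv_equiv track=rewrite | github.com/Garima-Mathur/Apriori_Algorithm_Implementation | Mathur_Garima_Midtermproj.py | k_4
-- ===== SOURCE A (Python) =====
-- import itertools
--
-- def k_4(Item_set3, Input_Data, Minimum_Support):
--     Item_set3 = list(Item_set3.keys())
--     L3 = sorted(list(set([item for t in Item_set3 for item in t])))
--     L3 = list(itertools.combinations(L3, 4))
--     candidate_set4 = {}
--     Item_set4 = {}
--     for iter1 in L3:
--         count = 0
--         for iter2 in Input_Data:
--             if sublist(iter1, iter2):
--                 count+=1
--         candidate_set4[iter1] = count
--     for key, value in candidate_set4.items():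
--         if value >= Minimum_Support:
--             if check_subset_frequency(key, Item_set3, 3):
--                 Item_set4[key] = value
--
--     return candidate_set4, Item_set4
--
-- def sublist(lst1, lst2):
--     return set(lst1) <= set(lst2)
--
-- def check_subset_frequency(itemset, l, n):
--     if n>1:
--         subsets = list(itertools.combinations(itemset, n))
--     else:
--         subsets = itemset
--     for iter1 in subsets:
--         if not iter1 in l:
--             return False
--     return True
-- ===== SOURCE B (Python) =====
-- import itertools
--
-- def k_4(Item_set3, Input_Data, Minimum_Support):
--     keys = list(Item_set3.keys())
--     universe = sorted(set(item for t in keys for item in t))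
--     uset = set(universe)
--     # One pass over the transactions: count each transaction's 4-subsets
--     # (restricted to items of the universe) into a counter.
--     counter = {}
--     for t in Input_Data:
--         s = sorted({x for x in t if x in uset})
--         for c in itertools.combinations(s, 4):
--             counter[c] = counter.get(c, 0) + 1
--     # Fill the candidate dict in canonical (sorted-combination) order.
--     candidate_set4 = {c: counter.get(c, 0) for c in itertools.combinations(universe, 4)}
--     key_set = set(keys)
--     Item_set4 = {c: v for c, v in candidate_set4.items()
--                  if v >= Minimum_Support
--                  and all(sub in key_set for sub in itertools.combinations(c, 3))}
--     return candidate_set4, Item_set4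
-- ===== Notes on version B (the rewrite author's own statement) =====
-- stated objective: faster
-- what changed: Instead of testing every 4-combination of the universe against every transaction (A), B makes one pass over the transactions, counting each transaction's own 4-subsets (restricted to the universe) into a counter dict, then fills the candidate dict in canonical combination order from the counter.
import Mathlib
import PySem

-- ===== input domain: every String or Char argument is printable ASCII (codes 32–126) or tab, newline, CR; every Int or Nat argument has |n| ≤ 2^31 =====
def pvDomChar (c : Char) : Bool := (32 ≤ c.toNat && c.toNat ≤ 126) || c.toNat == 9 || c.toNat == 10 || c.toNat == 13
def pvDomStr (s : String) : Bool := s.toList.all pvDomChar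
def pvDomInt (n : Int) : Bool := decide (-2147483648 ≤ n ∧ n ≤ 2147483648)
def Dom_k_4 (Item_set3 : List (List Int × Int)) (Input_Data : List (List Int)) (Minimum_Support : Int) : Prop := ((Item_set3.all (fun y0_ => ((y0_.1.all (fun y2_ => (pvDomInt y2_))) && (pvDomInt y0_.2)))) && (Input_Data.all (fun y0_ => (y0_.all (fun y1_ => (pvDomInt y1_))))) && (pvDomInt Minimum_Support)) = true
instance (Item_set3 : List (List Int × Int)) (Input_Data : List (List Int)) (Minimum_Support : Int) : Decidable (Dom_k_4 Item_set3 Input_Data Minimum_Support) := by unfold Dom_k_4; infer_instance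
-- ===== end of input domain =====

-- B replaces A's candidate-times-transaction support scan by one pass over the transactions
-- that counts each transaction's 4-subsets into a counter dict (objective: faster).


-- itertools.combinations(l, n) (used by both Pythons), in itertools' order:
-- tuples with the first element first, lexicographic by position.
def combs : Nat → List Int → List (List Int)
  | 0, _ => [[]]
  | _ + 1, [] => []
  | n + 1, x :: xs => ((combs n xs).map (fun c => x :: c)) ++ combs (n + 1) xs

-- ===== PORT A =====
-- sublist(lst1, lst2) = set(lst1) <= set(lst2)
def sublistA (lst1 lst2 : List Int) : Bool :=
  PySem.Set.issubset (PySem.Set.ofList lst1) (PySem.Set.ofList lst2)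

-- check_subset_frequency(itemset, l, n): A only calls it with n = 3 (> 1 branch);
-- the early-return membership loop over the combinations is ported as `all`.
def checkSubsetFrequency (itemset : List Int) (l : List (List Int)) : Bool :=
  (combs 3 itemset).all (fun iter1 => l.contains iter1)

def k_4 (Item_set3 : List (List Int × Int)) (Input_Data : List (List Int)) (Minimum_Support : Int) : (List (List Int × Int)) × (List (List Int × Int)) :=
  let keys := Item_set3.map Prod.fst
  let L3items := PySem.List.sorted (PySem.Set.ofList (keys.flatMap (fun t => t))) (fun x => x)
  let L3 := combs 4 L3items
  let candidate_set4 := L3.foldl (fun cand iter1 =>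
      let count := Input_Data.foldl
        (fun count iter2 => if sublistA iter1 iter2 then count + 1 else count) (0 : Int)
      cand.insert iter1 count) (PySem.Dict.empty : PySem.Dict (List Int) Int)
  let Item_set4 := candidate_set4.items.foldl (fun d kv =>
      if kv.2 ≥ Minimum_Support then
        if checkSubsetFrequency kv.1 keys then d.insert kv.1 kv.2 else d
      else d) (PySem.Dict.empty : PySem.Dict (List Int) Int)
  (candidate_set4.items, Item_set4.items)

-- ===== PORT B =====
-- the 4-subsets of one transaction, restricted to the universe: combinations(sorted({x in t if x in uset}), 4)
def txCombs (uni : List Int) (t : List Int) : List (List Int) :=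
  combs 4 (PySem.List.sorted (PySem.Set.ofList (t.filter (fun x => uni.contains x))) (fun x => x))

def k_4_alt (Item_set3 : List (List Int × Int)) (Input_Data : List (List Int)) (Minimum_Support : Int) : (List (List Int × Int)) × (List (List Int × Int)) :=
  let keys := Item_set3.map Prod.fst
  let uni := PySem.List.sorted (PySem.Set.ofList (keys.flatMap (fun t => t))) (fun x => x)
  -- one pass over the transactions: counter[c] = counter.get(c, 0) + 1 for each 4-subset c
  let counter := Input_Data.foldl
      (fun d t => (txCombs uni t).foldl (fun d c => d.modify c 0 (fun v => v + 1)) d)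
      (PySem.Dict.empty : PySem.Dict (List Int) Int)
  let candidate_set4 := (combs 4 uni).foldl (fun d c => d.insert c (counter.getD c 0))
      (PySem.Dict.empty : PySem.Dict (List Int) Int)
  let keySet := PySem.Set.ofList keys
  let Item_set4 := candidate_set4.items.foldl (fun d kv =>
      if kv.2 ≥ Minimum_Support ∧ (combs 3 kv.1).all (fun sub => PySem.Set.contains keySet sub)
      then d.insert kv.1 kv.2 else d) (PySem.Dict.empty : PySem.Dict (List Int) Int)
  (candidate_set4.items, Item_set4.items)

-- ===== PRECONDITION & SPEC =====
def Spec_k_4 (Item_set3 : List (List Int × Int)) (Input_Data : List (List Int)) (Minimum_Support : Int) (out : (List (List Int × Int)) × (List (List Int × Int))) : Prop := out = k_4_alt Item_set3 Input_Data Minimum_Support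
instance (Item_set3 : List (List Int × Int)) (Input_Data : List (List Int)) (Minimum_Support : Int) (out : (List (List Int × Int)) × (List (List Int × Int))) : Decidable (Spec_k_4 Item_set3 Input_Data Minimum_Support out) := by unfold Spec_k_4; infer_instance

-- ===== CLAIM (what is proved, stated in full; the proofs are below) =====
def Claim_equal_k_4 : Prop := ∀ (Item_set3 : List (List Int × Int)) (Input_Data : List (List Int)) (Minimum_Support : Int), Dom_k_4 Item_set3 Input_Data Minimum_Support → Spec_k_4 Item_set3 Input_Data Minimum_Support (k_4 Item_set3 Input_Data Minimum_Support)

-- ===== LEMMAS AND PROOFS =====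

-- membership in combs: exactly the sublists of the given length
theorem mem_combs (n : Nat) (l c : List Int) :
    c ∈ combs n l ↔ c.Sublist l ∧ c.length = n := by
  induction l generalizing n c with
  | nil =>
    cases n with
    | zero => simp [combs, List.sublist_nil, List.length_eq_zero_iff]
    | succ n => simp [combs, List.sublist_nil]; rintro rfl; simp
  | cons x xs ih =>
    cases n with
    | zero =>
      simp only [combs, List.mem_singleton]
      constructor
      · rintro rfl; simp
      · rintro ⟨_, hl⟩; exact List.length_eq_zero_iff.mp hl
    | succ n =>
      simp only [combs, List.mem_append, List.mem_map, ih]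
      rw [List.sublist_cons_iff]
      constructor
      · rintro (⟨a, ⟨hs, hl⟩, rfl⟩ | ⟨hs, hl⟩)
        · exact ⟨Or.inr ⟨a, rfl, hs⟩, by simp [hl]⟩
        · exact ⟨Or.inl hs, hl⟩
      · rintro ⟨(hs | ⟨r, rfl, hr⟩), hl⟩
        · exact Or.inr ⟨hs, hl⟩
        · exact Or.inl ⟨r, ⟨hr, by simpa using hl⟩, rfl⟩

theorem nodup_combs (n : Nat) (l : List Int) (h : l.Nodup) : (combs n l).Nodup := by
  induction l generalizing n with
  | nil => cases n <;> simp [combs]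
  | cons x xs ih =>
    cases n with
    | zero => simp [combs]
    | succ n =>
      have hx : x ∉ xs := (List.nodup_cons.mp h).1
      have hxs : xs.Nodup := (List.nodup_cons.mp h).2
      simp only [combs]
      refine List.Nodup.append ((ih n hxs).map ?_) (ih (n + 1) hxs) ?_
      · intro a b hab; simpa using hab
      · intro a ha hb
        rcases List.mem_map.mp ha with ⟨a', _, rfl⟩
        have := ((mem_combs (n + 1) xs _).mp hb).1.subset (List.mem_cons_self)
        exact hx this

-- the item universe A and B sort is strictly increasing, hence Nodup
theorem pairwise_sortedSet (xs : List Int) :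
    (PySem.List.sorted (PySem.Set.ofList xs) (fun x => x)).Pairwise (· < ·) :=
  PySem.List.sorted_ofList_pairwise_lt xs

theorem mem_sortedSet (xs : List Int) (y : Int) :
    y ∈ PySem.List.sorted (PySem.Set.ofList xs) (fun x => x) ↔ y ∈ xs := by
  rw [PySem.List.mem_sorted, PySem.Set.mem_ofList]

-- A's subset test, as a proposition
theorem sublistA_iff (c t : List Int) : sublistA c t = true ↔ ∀ x ∈ c, x ∈ t := by
  simp [sublistA, PySem.Set.issubset, PySem.Set.contains, List.all_eq_true,
    PySem.Set.mem_ofList]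

-- the bridge: for a 4-combination c of the universe, "c is among transaction t's
-- counted 4-subsets" is exactly A's subset test sublist(c, t)
theorem mem_txCombs_iff (Item_set3 : List (List Int × Int)) (t c : List Int)
    (hc : c ∈ combs 4 (PySem.List.sorted (PySem.Set.ofList ((Item_set3.map Prod.fst).flatMap (fun t => t))) (fun x => x))) :
    c ∈ txCombs (PySem.List.sorted (PySem.Set.ofList ((Item_set3.map Prod.fst).flatMap (fun t => t))) (fun x => x)) t
      ↔ sublistA c t = true := by
  set uni := PySem.List.sorted (PySem.Set.ofList ((Item_set3.map Prod.fst).flatMap (fun t => t))) (fun x => x) with huni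
  obtain ⟨hsub, hlen⟩ := (mem_combs 4 uni c).mp hc
  have hcp : c.Pairwise (· < ·) := (pairwise_sortedSet _).sublist hsub
  have hcnd : c.Nodup := hcp.imp ne_of_lt
  rw [sublistA_iff, txCombs, mem_combs]
  set s := PySem.List.sorted (PySem.Set.ofList (t.filter (fun x => uni.contains x))) (fun x => x) with hs
  have hmem : ∀ y, y ∈ s ↔ y ∈ t ∧ y ∈ uni := by
    intro y
    rw [hs, mem_sortedSet, List.mem_filter, List.contains_iff_mem]
  constructor
  · rintro ⟨hcs, _⟩
    intro x hx
    exact ((hmem x).mp (hcs.subset hx)).1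
  · intro h
    refine ⟨?_, hlen⟩
    have hsubset : c ⊆ s := by
      intro x hx
      exact (hmem x).mpr ⟨h x hx, hsub.subset hx⟩
    exact List.sublist_of_subperm_of_pairwise (hcnd.subperm hsubset) hcp (pairwise_sortedSet _)

-- B's counter after the one pass: for any key, initial value plus the number of
-- transactions whose counted 4-subsets contain it
theorem counter_getD (uni : List Int) (ts : List (List Int)) (d : PySem.Dict (List Int) Int) (c : List Int) :
    (ts.foldl (fun d t => (txCombs uni t).foldl (fun d c => d.modify c 0 (fun v => v + 1)) d) d).getD c 0
      = d.getD c 0 + (ts.countP (fun t => decide (c ∈ txCombs uni t)) : Int) := by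
  induction ts generalizing d with
  | nil => simp
  | cons t ts ih =>
    simp only [List.foldl_cons, ih, PySem.Dict.getD_foldl_modify_add_one, List.countP_cons]
    have hnd : (txCombs uni t).Nodup := by
      refine nodup_combs 4 _ ?_
      exact (PySem.List.sorted_perm _ _ _).symm.nodup (PySem.Set.nodup_ofList _)
    by_cases hm : c ∈ txCombs uni t
    · rw [List.count_eq_one_of_mem hnd hm]
      simp [hm]; ring
    · rw [List.count_eq_zero_of_not_mem hm]
      simp [hm]

-- B's set-membership test over the 3-subsets equals A's list-membership test
theorem check_eq (keys : List (List Int)) (c : List Int) :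
    ((combs 3 c).all (fun sub => PySem.Set.contains (PySem.Set.ofList keys) sub))
      = checkSubsetFrequency c keys := by
  simp only [checkSubsetFrequency]
  congr 1
  funext sub
  rw [Bool.eq_iff_iff]
  simp [PySem.Set.contains, PySem.Set.mem_ofList]

-- ===== VERDICT (by name: the statement is the Claim_ definition above) =====
theorem k_4_spec : Claim_equal_k_4 := by
  intro Item_set3 Input_Data Minimum_Support _
  unfold Spec_k_4
  simp only [k_4, k_4_alt]
  set keys := Item_set3.map Prod.fst with hkeys
  set uni := PySem.List.sorted (PySem.Set.ofList (keys.flatMap (fun t => t))) (fun x => x) with huni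
  -- the two candidate dicts are equal
  have hcand :
      (combs 4 uni).foldl (fun cand iter1 =>
          cand.insert iter1 (Input_Data.foldl
            (fun count iter2 => if sublistA iter1 iter2 then count + 1 else count) (0 : Int)))
        (PySem.Dict.empty : PySem.Dict (List Int) Int)
      = (combs 4 uni).foldl (fun d c =>
          d.insert c ((Input_Data.foldl
            (fun d t => (txCombs uni t).foldl (fun d c => d.modify c 0 (fun v => v + 1)) d)
            (PySem.Dict.empty : PySem.Dict (List Int) Int)).getD c 0))
        (PySem.Dict.empty : PySem.Dict (List Int) Int) := by
    apply PySem.List.foldl_congr_mem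
    intro acc c hc
    congr 1
    rw [counter_getD, PySem.Dict.getD_empty, PySem.List.foldl_count_if, zero_add, zero_add]
    congr 1
    apply List.countP_congr
    intro t _
    rw [decide_eq_true_iff]
    exact (mem_txCombs_iff Item_set3 t c hc).symm
  rw [← hcand]
  -- the two Item_set4 filters are equal
  congr 1
  congr 1
  apply PySem.List.foldl_congr_mem
  intro acc kv _
  rw [check_eq keys kv.1]
  by_cases h1 : kv.2 ≥ Minimum_Support <;>
    by_cases h2 : checkSubsetFrequency kv.1 keys = true <;>
      simp [h1, h2]
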